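-- pv_equiv track=rewrite | github.com/PyCampES/geosong | ingest/metadata.py | get_most_likely_genre
-- ===== SOURCE A (Python) =====
-- from collections import Counter
--
-- def get_most_likely_genre(recording):
--     tags = Counter()
--     for tag_dict in recording.get("tag-list", []):
--         tags[tag_dict["name"]] += int(tag_dict["count"])
--
--     most_common = tags.most_common()
--     if most_common:
--         return most_common[0][0]
--     else:
--         return "unknown"
-- ===== SOURCE B (Python) =====
-- def get_most_likely_genre(recording):
--     # No tally dict at all: consume the tag list group by group. Take the first
--     # remaining entry's name, sum that name's counts in one scan, keep it if its
--     # total strictly beats the best so far (so the earliest group wins ties,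
--     # matching Counter.most_common's stable order), then drop the whole group.
--     entries = recording.get("tag-list", [])
--     best_name = "unknown"
--     best_total = None
--     while entries:
--         name = entries[0]["name"]
--         total = sum(int(e["count"]) for e in entries if e["name"] == name)
--         if best_total is None or total > best_total:
--             best_name, best_total = name, total
--         entries = [e for e in entries if e["name"] != name]
--     return best_name
-- ===== Notes on version B (the rewrite author's own statement) =====
-- stated objective: alternative
-- what changed: Drops the Counter/dict tally and the most_common() sort entirely: B consumes the tag list group by group, summing the first remaining name's counts with a direct scan, keeping a running best (strict improvement only, so the earliest group wins ties like the stable sort), and filtering that group out; it trades the hash tally for nested scans over the shrinking list.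
import Mathlib
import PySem

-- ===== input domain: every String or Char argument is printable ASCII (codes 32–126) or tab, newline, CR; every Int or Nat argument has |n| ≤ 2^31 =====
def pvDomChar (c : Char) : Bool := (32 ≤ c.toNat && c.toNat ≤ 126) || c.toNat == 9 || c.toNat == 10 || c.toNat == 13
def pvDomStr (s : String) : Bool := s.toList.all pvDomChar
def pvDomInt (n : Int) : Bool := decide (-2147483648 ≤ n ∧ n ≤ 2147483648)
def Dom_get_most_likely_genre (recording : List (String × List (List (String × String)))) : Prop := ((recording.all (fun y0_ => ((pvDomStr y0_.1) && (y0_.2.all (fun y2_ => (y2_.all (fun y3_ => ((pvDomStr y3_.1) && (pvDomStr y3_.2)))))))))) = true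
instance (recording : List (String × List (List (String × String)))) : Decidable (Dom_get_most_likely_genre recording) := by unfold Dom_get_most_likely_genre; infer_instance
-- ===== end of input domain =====

-- B drops the Counter tally and the most_common() sort: it consumes the tag list group by
-- group (first remaining name, one summing scan, running best, filter the group out);
-- return value only — neither version mutates its argument.

-- ===== PORT A =====
-- shared helpers: tag_dict["name"] and int(tag_dict["count"]); none = KeyError/ValueError (excluded by Pre_)
def pvName (tag_dict : List (String × String)) : Option String :=
  (PySem.Dict.mk tag_dict).get? "name"
def pvCount (tag_dict : List (String × String)) : Option Int :=
  ((PySem.Dict.mk tag_dict).get? "count").bind PySem.Int.ofStr?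

-- one loop iteration: tags[tag_dict["name"]] += int(tag_dict["count"]); under Pre_
-- both lookups and int() succeed, the catch-all branch is never taken
def pvAStep (tags : PySem.Dict String Int) (tag_dict : List (String × String)) : PySem.Dict String Int :=
  match pvName tag_dict, pvCount tag_dict with
  | some name, some n => tags.modify name 0 (· + n)   -- Counter: missing key counts as 0
  | _, _ => tags

def get_most_likely_genre (recording : List (String × List (List (String × String)))) : String :=
  let tags := ((PySem.Dict.mk recording).getD "tag-list" []).foldl pvAStep PySem.Dict.empty
  let most_common := PySem.List.sorted tags.items (·.2) true   -- Counter.most_common(): stable sort by count, descending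
  match most_common with
  | kv :: _ => kv.1
  | [] => "unknown"

-- ===== PORT B =====
-- total = sum(int(e["count"]) for e in entries if e["name"] == name)
def pvTotal (entries : List (List (String × String))) (name : String) : Int :=
  (entries.filter (fun e => pvName e == some name)).foldl (fun s e => s + (pvCount e).getD 0) 0

-- the while loop, state (entries, best_name, best_total); Python filters `entries`,
-- whose head never passes e["name"] != name, so filtering `rest` is the same list
def pvLoop : List (List (String × String)) → String → Option Int → String
  | [], bn, _ => bn
  | e :: rest, bn, bt =>
    match pvName e with
    | none => bn   -- KeyError in Python; excluded by Pre_
    | some name =>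
      let total := pvTotal (e :: rest) name
      let upd : Bool := match bt with | none => true | some b => b < total
      pvLoop (rest.filter (fun x => !(pvName x == some name)))
        (if upd then name else bn) (if upd then some total else bt)
termination_by l _ _ => l.length
decreasing_by
  simp only [List.length_unattach, List.length_cons]
  exact Nat.lt_succ_of_le (le_trans (List.length_filter_le _ _) (by simp))

def get_most_likely_genre_alt (recording : List (String × List (List (String × String)))) : String :=
  pvLoop ((PySem.Dict.mk recording).getD "tag-list" []) "unknown" none

-- ===== PRECONDITION & SPEC =====
-- Pre_ excludes exactly the inputs where Python A raises: a tag dict in "tag-list"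
-- missing the "name" or "count" key (KeyError) or whose "count" is not int()-parseable (ValueError).
def Pre_get_most_likely_genre (recording : List (String × List (List (String × String)))) : Prop :=
  ∀ tag_dict ∈ (PySem.Dict.mk recording).getD "tag-list" [],
    ((PySem.Dict.mk tag_dict).get? "name").isSome = true ∧
    (((PySem.Dict.mk tag_dict).get? "count").bind PySem.Int.ofStr?).isSome = true
instance (recording : List (String × List (List (String × String)))) : Decidable (Pre_get_most_likely_genre recording) := by unfold Pre_get_most_likely_genre; infer_instance
def pvWitness_get_most_likely_genre : (List (String × List (List (String × String)))) :=
  [("tag-list", [[("name", "rock"), ("count", "3")], [("name", "pop"), ("count", " 2 ")]])]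

def Spec_get_most_likely_genre (recording : List (String × List (List (String × String)))) (out : String) : Prop := out = get_most_likely_genre_alt recording
instance (recording : List (String × List (List (String × String)))) (out : String) : Decidable (Spec_get_most_likely_genre recording out) := by unfold Spec_get_most_likely_genre; infer_instance

-- ===== CLAIM (what is proved, stated in full; the proofs are below) =====
def Claim_equal_get_most_likely_genre : Prop := ∀ (recording : List (String × List (List (String × String)))), Dom_get_most_likely_genre recording → Pre_get_most_likely_genre recording → Spec_get_most_likely_genre recording (get_most_likely_genre recording)

-- ===== LEMMAS AND PROOFS =====

-- proof-side descriptions of the data both programs work over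
-- the names A's Counter actually gets a key for, in list order
def pvNames (l : List (List (String × String))) : List String :=
  l.filterMap (fun e => match pvName e, pvCount e with
    | some n, some _ => some n
    | _, _ => none)

-- first occurrences, in order
def pvFirsts : List String → List String
  | [] => []
  | n :: ns => n :: (pvFirsts ns).filter (fun m => !(m == n))

-- the (name, total) pairs A's Counter holds, in insertion order
def pvL (l : List (List (String × String))) : List (String × Int) :=
  (pvFirsts (pvNames l)).map (fun n => (n, pvTotal l n))

def pvPreL (l : List (List (String × String))) : Prop :=
  ∀ x ∈ l, (pvName x).isSome = true ∧ (pvCount x).isSome = true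

-- head of insertBy = "keep the incumbent unless the new element must go before it"
theorem pv_head?_insertBy {α : Type} (before : α → α → Bool) (x : α) (acc : List α) :
    (PySem.List.insertBy before x acc).head? =
      some (match acc.head? with
            | none => x
            | some h => if before x h then x else h) := by
  cases acc with
  | nil => simp [PySem.List.insertBy]
  | cons y ys => by_cases h : before x y <;> simp [PySem.List.insertBy, h]

-- the head of the insertion-sort fold is the first-extremum fold
theorem pv_head?_foldl_insertBy {α : Type} (before : α → α → Bool) :
    ∀ (xs acc : List α),
      (xs.foldl (fun a x => PySem.List.insertBy before x a) acc).head? =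
      xs.foldl (fun m x => match m with
                 | none => some x
                 | some h => if before x h then some x else some h) acc.head? := by
  intro xs
  induction xs with
  | nil => intro acc; rfl
  | cons x t ih =>
    intro acc
    simp only [List.foldl]
    rw [ih, pv_head?_insertBy]
    cases acc with
    | nil => rfl
    | cons y ys => by_cases h : before x y <;> simp [h]

-- Python's max over items is the head of the stable reverse sort (first maximal item in both)
theorem pv_max?_eq_head_sorted_rev {α κ : Type} [LT κ] [DecidableLT κ]
    (xs : List α) (key : α → κ) :
    PySem.List.max? xs key = (PySem.List.sorted xs key true).head? := by
  show _ = (xs.foldl (fun a x => PySem.List.insertBy (fun a b => decide (key b < key a)) x a) []).head?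
  rw [pv_head?_foldl_insertBy]
  unfold PySem.List.max?
  congr 1
  funext m x
  cases m with
  | none => rfl
  | some h => simp

-- the running max?-fold, once seeded, never returns none
theorem pv_fold_some {α : Type} (key : α → Int) :
    ∀ (l : List α) (z : α),
      l.foldl (fun acc x => match acc with
        | none => some x
        | some m => if key m < key x then some x else some m) (some z)
      = some (l.foldl (fun a y => if key a < key y then y else a) z) := by
  intro l
  induction l with
  | nil => intro z; rfl
  | cons y t ih =>
    intro z
    simp only [List.foldl]
    rw [← apply_ite some, ih]

theorem pv_max?_cons {α : Type} (key : α → Int) (z : α) (l : List α) :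
    PySem.List.max? (z :: l) key = some (l.foldl (fun a y => if key a < key y then y else a) z) := by
  unfold PySem.List.max?
  simp only [List.foldl]
  exact pv_fold_some key l z

-- the seeded running max is the first maximal element, seed wins ties
theorem pv_foldl_inner_eq {α : Type} (key : α → Int) :
    ∀ (l : List α) (z : α),
      l.foldl (fun a y => if key a < key y then y else a) z =
      (match PySem.List.max? l key with
       | none => z
       | some m => if key z < key m then m else z) := by
  intro l
  induction l with
  | nil => intro z; rfl
  | cons y t ih =>
    intro z
    simp only [List.foldl]
    rw [ih, pv_max?_cons key y t, ih y]
    cases hm : PySem.List.max? t key with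
    | none => simp
    | some m =>
      simp only []
      split_ifs <;> first | rfl | (exfalso; omega)

-- pvTotal over a cons
theorem pv_total_cons (x : List (String × String)) (t : List (List (String × String))) (n : String) :
    pvTotal (x :: t) n =
      (if pvName x == some n then (pvCount x).getD 0 else 0) + pvTotal t n := by
  unfold pvTotal
  rw [List.filter_cons]
  by_cases h : (pvName x == some n) = true
  · simp only [h, if_true, List.foldl_cons, PySem.List.foldl_add]
    omega
  · simp [h]

-- dropping one name's whole group does not change any other name's total
theorem pv_total_filter (l : List (List (String × String))) (name n : String) (h : n ≠ name) :
    pvTotal (l.filter (fun x => !(pvName x == some name))) n = pvTotal l n := by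
  induction l with
  | nil => rfl
  | cons x t ih =>
    rw [List.filter_cons]
    by_cases hx : (pvName x == some name) = true
    · have hx' : pvName x = some name := by simpa using hx
      simp only [hx, Bool.not_true, Bool.false_eq_true, if_false]
      rw [ih, pv_total_cons, hx']
      have hnn : (some name == some n) = false := by simp [Ne.symm h]
      simp [hnn]
    · simp only [Bool.not_eq_true] at hx
      simp only [hx, Bool.not_false, if_true]
      rw [pv_total_cons, pv_total_cons, ih]

-- the tallied names of the filtered list are the filtered tallied names
theorem pv_names_filter (l : List (List (String × String))) (name : String) :
    pvNames (l.filter (fun x => !(pvName x == some name)))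
      = (pvNames l).filter (fun m => !(m == name)) := by
  induction l with
  | nil => rfl
  | cons x t ih =>
    rw [List.filter_cons]
    cases hn : pvName x with
    | none =>
      norm_num
      simp only [pvNames, List.filterMap_cons, hn] at *
      exact ih
    | some m =>
      cases hc : pvCount x with
      | none =>
        by_cases hm : (m == name) = true
        · simp only [Option.some_beq_some, hm, Bool.not_true, Bool.false_eq_true, if_false]
          simp only [pvNames, List.filterMap_cons, hn, hc] at *
          exact ih
        · simp only [Option.some_beq_some, hm, Bool.not_false, if_true]
          simp only [pvNames, List.filterMap_cons, hn, hc] at *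
          exact ih
      | some c =>
        by_cases hm : (m == name) = true
        · simp only [Option.some_beq_some, hm, Bool.not_true, Bool.false_eq_true, if_false]
          simp only [pvNames, List.filterMap_cons, hn, hc] at *
          rw [List.filter_cons]
          simp only [hm, Bool.not_true, Bool.false_eq_true, if_false]
          exact ih
        · simp only [Option.some_beq_some, hm, Bool.not_false, if_true]
          simp only [pvNames, List.filterMap_cons, hn, hc] at *
          rw [List.filter_cons]
          simp only [hm, Bool.not_false, if_true]
          rw [ih]

-- first occurrences commute with filtering
theorem pv_firsts_filter (p : String → Bool) :
    ∀ ns : List String, pvFirsts (ns.filter p) = (pvFirsts ns).filter p := by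
  intro ns
  induction ns with
  | nil => rfl
  | cons n t ih =>
    rw [List.filter_cons]
    by_cases hp : p n = true
    · simp only [hp, if_true, pvFirsts]
      rw [ih, List.filter_cons]
      simp only [hp, if_true, List.filter_filter, List.filter_filter]
      congr 1
      exact List.filter_congr (fun a _ => Bool.and_comm _ _)
    · simp only [hp, Bool.false_eq_true, if_false, pvFirsts]
      rw [ih, List.filter_cons]
      simp only [hp, Bool.false_eq_true, if_false, List.filter_filter]
      refine (List.filter_congr fun a _ => ?_).symm
      by_cases ha : p a = true
      · have : (a == n) = false := by
          refine beq_eq_false_iff_ne.mpr fun hE => ?_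
          subst hE; exact hp ha
        simp [this, ha]
      · simp only [Bool.not_eq_true] at ha
        simp [ha]

-- modify with default 0 is insert of the bumped value
theorem pv_modify_eq_insert (d : PySem.Dict String Int) (k : String) (c : Int) :
    d.modify k 0 (· + c) = d.insert k (d.getD k 0 + c) := by
  rfl

-- what A's tally loop builds, item by item: old items with bumped totals, then the new names
theorem pv_items_foldl :
    ∀ (l : List (List (String × String))) (d : PySem.Dict String Int), d.keys.Nodup →
      (l.foldl pvAStep d).items
        = d.items.map (fun kv => (kv.1, kv.2 + pvTotal l kv.1))
          ++ ((pvFirsts (pvNames l)).filter (fun n => !(d.contains n))).map (fun n => (n, pvTotal l n)) := by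
  intro l
  induction l with
  | nil =>
    intro d _
    simp [pvNames, pvFirsts, pvTotal]
  | cons x t ih =>
    intro d hd
    simp only [List.foldl_cons]
    cases hn : pvName x with
    | none =>
      have hstep : pvAStep d x = d := by simp [pvAStep, hn]
      have hnames : pvNames (x :: t) = pvNames t := by simp [pvNames, hn]
      have htot : ∀ n, pvTotal (x :: t) n = pvTotal t n := by
        intro n; rw [pv_total_cons]; simp [hn]
      rw [hstep, ih d hd, hnames]
      simp only [htot]
    | some m =>
      cases hc : pvCount x with
      | none =>
        have hstep : pvAStep d x = d := by simp [pvAStep, hn, hc]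
        have hnames : pvNames (x :: t) = pvNames t := by simp [pvNames, hn, hc]
        have htot : ∀ n, pvTotal (x :: t) n = pvTotal t n := by
          intro n; rw [pv_total_cons]; simp [hc]
        rw [hstep, ih d hd, hnames]
        simp only [htot]
      | some c =>
        have hstep : pvAStep d x = d.insert m (d.getD m 0 + c) := by
          simp [pvAStep, hn, hc, pv_modify_eq_insert]
        have hnames : pvNames (x :: t) = m :: pvNames t := by simp [pvNames, hn, hc]
        have htot : ∀ n, pvTotal (x :: t) n = (if m == n then c else 0) + pvTotal t n := by
          intro n; rw [pv_total_cons, hn, hc]; simp [Option.some_beq_some]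
        rw [hstep, ih _ (PySem.Dict.nodup_keys_insert d m _ hd), hnames]
        by_cases hcont : d.contains m = true
        · -- the name already has a key: its value is bumped in place
          rw [PySem.Dict.items_insert_of_contains d _ hcont]
          have hcont' : ∀ n, (d.insert m (d.getD m 0 + c)).contains n = d.contains n := by
            intro n; rw [PySem.Dict.contains_insert]
            by_cases hnm : (n == m) = true
            · have : n = m := eq_of_beq hnm; subst this; simp [hcont]
            · simp [hnm]
          rw [List.map_map]
          congr 1
          · apply List.map_congr_left
            intro kv hkv
            by_cases hkm : (kv.1 == m) = true
            · have hk : kv.1 = m := eq_of_beq hkm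
              have hmem : (kv.1, kv.2) ∈ d.items := by simpa using hkv
              have hv : d.getD kv.1 0 = kv.2 := PySem.Dict.getD_of_mem_items d hmem hd 0
              rw [← hk] at *
              simp only [Function.comp, htot kv.1]
              simp [hv]
              have hmeq : m = kv.1 := (eq_of_beq hkm).symm
              simp [hmeq]
              omega
            · have hmk : (m == kv.1) = false := by
                refine beq_eq_false_iff_ne.mpr fun hE => ?_
                subst hE; simp at hkm
              simp only [Function.comp, hkm, htot kv.1, hmk]
              simp
          · -- new-names part: m is dropped from the firsts, everything else unchanged
            have hLf : (pvFirsts (pvNames t)).filter (fun n => !((d.insert m (d.getD m 0 + c)).contains n))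
                = (pvFirsts (pvNames t)).filter (fun n => !(d.contains n)) :=
              List.filter_congr (fun n _ => by rw [hcont' n])
            rw [hLf]
            simp only [pvFirsts]
            rw [List.filter_cons]
            have hm0 : (!(d.contains m)) = false := by simp [hcont]
            simp only [hm0, Bool.false_eq_true, if_false, List.filter_filter]
            have hff : (pvFirsts (pvNames t)).filter (fun n => !(d.contains n) && !(n == m))
                = (pvFirsts (pvNames t)).filter (fun n => !(d.contains n)) := by
              refine List.filter_congr fun n _ => ?_
              by_cases hcn : d.contains n = true
              · simp [hcn]
              · have : (n == m) = false := by
                  refine beq_eq_false_iff_ne.mpr fun hE => ?_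
                  subst hE; exact hcn hcont
                simp [hcn, this]
            rw [hff]
            apply List.map_congr_left
            intro n hmemn
            have hcn : d.contains n = false := by
              rcases List.mem_filter.mp hmemn with ⟨-, h2⟩
              simpa using h2
            have hmn : (m == n) = false := by
              refine beq_eq_false_iff_ne.mpr fun hE => ?_
              subst hE; rw [hcont] at hcn; exact Bool.true_eq_false.mp hcn
            rw [htot n, hmn]
            simp
        · -- a fresh name: its key is appended
          have hcont0 : d.contains m = false := by simpa using hcont
          rw [PySem.Dict.items_insert_of_not_contains d _ hcont0,
              PySem.Dict.getD_of_not_contains d 0 hcont0]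
          have hcont' : ∀ n, (d.insert m (0 + c)).contains n = ((n == m) || d.contains n) := by
            intro n; rw [PySem.Dict.contains_insert]
          simp only [List.map_append, List.append_assoc]
          congr 1
          · apply List.map_congr_left
            intro kv hkv
            have hkm : (m == kv.1) = false := by
              refine beq_eq_false_iff_ne.mpr fun hE => ?_
              subst hE
              exact (Bool.true_eq_false.mp (by
                rw [← hcont0]
                exact ((PySem.Dict.contains_iff_mem_keys d kv.1).mpr
                  (PySem.Dict.mem_keys_of_mem_items d hkv)).symm))
            rw [htot kv.1, hkm]
            simp
          · -- [(m, 0+c)] ++ filtered-new = (m, total) :: filtered-new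
            simp only [pvFirsts]
            rw [List.filter_cons]
            have hm1 : (!(d.contains m)) = true := by simp [hcont0]
            simp only [hm1, if_true, List.map_cons, List.filter_filter,
                       List.map_nil, List.nil_append, List.cons_append]
            rw [htot m]
            have hmm : (m == m) = true := by simp
            simp only [hmm, if_true]
            congr 1
            · norm_num
            · have hff : (pvFirsts (pvNames t)).filter (fun n => !((d.insert m (0 + c)).contains n))
                  = (pvFirsts (pvNames t)).filter (fun n => !(d.contains n) && !(n == m)) := by
                refine List.filter_congr fun n _ => ?_
                rw [hcont' n]
                by_cases hnm : (n == m) = true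
                · simp [hnm]
                · by_cases hcn : d.contains n = true <;> simp [hnm, hcn]
              rw [hff]
              have hcomm : (pvFirsts (pvNames t)).filter (fun n => !(d.contains n) && !(n == m))
                  = (pvFirsts (pvNames t)).filter (fun n => !(n == m) && !(d.contains n)) :=
                List.filter_congr (fun a _ => Bool.and_comm _ _)
              rw [hcomm]
              apply List.map_congr_left
              intro n hmemn
              have hnm : (n == m) = false := by
                rcases List.mem_filter.mp hmemn with ⟨-, h2⟩
                rcases (Bool.and_eq_true _ _).mp h2 with ⟨h3, -⟩
                simpa using h3
              have hmn : (m == n) = false := by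
                refine beq_eq_false_iff_ne.mpr fun hE => ?_
                subst hE; simp at hnm
              rw [htot n, hmn]
              simp

theorem pv_items_empty (l : List (List (String × String))) :
    (l.foldl pvAStep PySem.Dict.empty).items = pvL l := by
  rw [pv_items_foldl l PySem.Dict.empty PySem.Dict.nodup_keys_empty]
  simp [pvL, PySem.Dict.contains_empty]
  rfl

-- pvL over a cons whose head is well-formed
theorem pv_L_cons (e : List (String × String)) (rest : List (List (String × String)))
    (name : String) (hn : pvName e = some name) (hc : (pvCount e).isSome = true) :
    pvL (e :: rest)
      = (name, pvTotal (e :: rest) name) :: pvL (rest.filter (fun x => !(pvName x == some name))) := by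
  obtain ⟨c, hc'⟩ := Option.isSome_iff_exists.mp hc
  have hnames : pvNames (e :: rest) = name :: pvNames rest := by
    simp [pvNames, hn, hc']
  unfold pvL
  rw [hnames]
  simp only [pvFirsts, List.map_cons]
  congr 1
  rw [pv_names_filter, pv_firsts_filter]
  apply List.map_congr_left
  intro n hmem
  have hnn : (n == name) = false := by
    rcases List.mem_filter.mp hmem with ⟨-, h2⟩; simpa using h2
  have hne : n ≠ name := by simpa using hnn
  rw [pv_total_filter rest name n hne, pv_total_cons, hn]
  have hsn : (some name == some n) = false := by
    simp [Option.some_beq_some]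
    exact fun hE => hne hE.symm
  simp [hsn]

-- B's loop returns the first name with maximal total (earliest group wins ties)
theorem pv_loop_eq :
    ∀ (N : Nat) (l : List (List (String × String))), l.length ≤ N → pvPreL l →
      ∀ (bn : String) (bt : Option Int),
        pvLoop l bn bt =
          (match bt, PySem.List.max? (pvL l) (fun kv => kv.2) with
           | _, none => bn
           | none, some m => m.1
           | some b, some m => if b < m.2 then m.1 else bn) := by
  intro N
  induction N with
  | zero =>
    intro l hl _ bn bt
    have : l = [] := List.eq_nil_of_length_eq_zero (Nat.le_zero.mp hl)
    subst this
    cases bt <;> simp [pvLoop] <;> rfl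
  | succ N ih =>
    intro l hl hpre bn bt
    cases l with
    | nil => cases bt <;> simp [pvLoop] <;> rfl
    | cons e rest =>
      obtain ⟨hne, hce⟩ := hpre e (List.mem_cons_self)
      obtain ⟨name, hn⟩ := Option.isSome_iff_exists.mp hne
      have hpre' : pvPreL (rest.filter (fun x => !(pvName x == some name))) :=
        fun x hx => hpre x (List.mem_cons_of_mem _ (List.mem_of_mem_filter hx))
      have hlen : (rest.filter (fun x => !(pvName x == some name))).length ≤ N :=
        le_trans (List.length_filter_le _ _) (Nat.le_of_succ_le_succ hl)
      rw [pvLoop, hn]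
      simp only []
      rw [ih _ hlen hpre', pv_L_cons e rest name hn hce, pv_max?_cons, pv_foldl_inner_eq]
      cases bt with
      | none =>
        simp only []
        cases hm : PySem.List.max? (pvL (rest.filter (fun x => !(pvName x == some name)))) (fun kv => kv.2) with
        | none => simp
        | some m =>
          show (if pvTotal (e :: rest) name < m.2 then m.1 else name)
              = (if pvTotal (e :: rest) name < m.2 then m else (name, pvTotal (e :: rest) name)).1
          rw [apply_ite Prod.fst]
      | some b =>
        by_cases hb : b < pvTotal (e :: rest) name
        · simp only [hb, if_true, decide_true]
          cases hm : PySem.List.max? (pvL (rest.filter (fun x => !(pvName x == some name)))) (fun kv => kv.2) with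
          | none => simp [hb]
          | some m =>
            show (if pvTotal (e :: rest) name < m.2 then m.1 else name)
                = (if b < (if pvTotal (e :: rest) name < m.2 then m else (name, pvTotal (e :: rest) name)).2
                   then (if pvTotal (e :: rest) name < m.2 then m else (name, pvTotal (e :: rest) name)).1 else bn)
            rw [apply_ite Prod.fst, apply_ite Prod.snd]
            split_ifs <;> first | rfl | (exfalso; omega)
        · simp only [hb, decide_false]
          cases hm : PySem.List.max? (pvL (rest.filter (fun x => !(pvName x == some name)))) (fun kv => kv.2) with
          | none => simp [hb]
          | some m =>
            show (if b < m.2 then m.1 else bn)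
                = (if b < (if pvTotal (e :: rest) name < m.2 then m else (name, pvTotal (e :: rest) name)).2
                   then (if pvTotal (e :: rest) name < m.2 then m else (name, pvTotal (e :: rest) name)).1 else bn)
            rw [apply_ite Prod.fst, apply_ite Prod.snd]
            split_ifs <;> first | rfl | (exfalso; omega)

-- ===== VERDICT (by name: the statement is the Claim_ definition above) =====
theorem get_most_likely_genre_spec : Claim_equal_get_most_likely_genre := by
  intro recording _ hpre
  unfold Spec_get_most_likely_genre get_most_likely_genre get_most_likely_genre_alt
  simp only []
  have hpreL : pvPreL ((PySem.Dict.mk recording).getD "tag-list" []) := fun x hx => hpre x hx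
  rw [pv_loop_eq _ _ le_rfl hpreL, ← pv_items_empty]
  have hms := pv_max?_eq_head_sorted_rev
    (((PySem.Dict.mk recording).getD "tag-list" []).foldl pvAStep PySem.Dict.empty).items
    (fun kv : String × Int => kv.2)
  cases hs : PySem.List.sorted
      (((PySem.Dict.mk recording).getD "tag-list" []).foldl pvAStep PySem.Dict.empty).items
      (fun kv : String × Int => kv.2) true with
  | nil =>
    rw [hs] at hms
    simp only [List.head?_nil] at hms
    rw [hms]
  | cons kv tl =>
    rw [hs] at hms
    simp only [List.head?_cons] at hms
    rw [hms]
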